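-- pv_equiv track=rewrite | github.com/mkrajew/bees | wings/app/utils.py | generate_check_images_text
-- ===== SOURCE A (Python) =====
-- def generate_check_images_text(check_ids):
--     text = ""
--     if len(check_ids) == 1:
--         text = f"### Please carefully check image {check_ids[0] + 1}."
--     elif len(check_ids) >= 1:
--         text = "### Please carefully check images "
--         for check_id in check_ids[:-2]:
--             text += f"{check_id + 1}, "
--         text += f"{check_ids[-2] + 1} and {check_ids[-1] + 1}."
--
--     return text
-- ===== SOURCE B (Python) =====
-- def generate_check_images_text(check_ids):
--     nums = [str(c + 1) for c in check_ids]
--     if not nums: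
--         return ""
--     if len(nums) == 1:
--         return f"### Please carefully check image {nums[0]}."
--     return ("### Please carefully check images "
--             + ", ".join(nums[:-1]) + " and " + nums[-1] + ".")
-- ===== Notes on version B (the rewrite author's own statement) =====
-- stated objective: idiomatic
-- what changed: B precomputes the formatted numbers once, returns early per case, and replaces A's manual accumulation loop over [:-2] plus a hand-assembled two-element tail with a single ', '.join over [:-1]; same O(n) cost.
import Mathlib
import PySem

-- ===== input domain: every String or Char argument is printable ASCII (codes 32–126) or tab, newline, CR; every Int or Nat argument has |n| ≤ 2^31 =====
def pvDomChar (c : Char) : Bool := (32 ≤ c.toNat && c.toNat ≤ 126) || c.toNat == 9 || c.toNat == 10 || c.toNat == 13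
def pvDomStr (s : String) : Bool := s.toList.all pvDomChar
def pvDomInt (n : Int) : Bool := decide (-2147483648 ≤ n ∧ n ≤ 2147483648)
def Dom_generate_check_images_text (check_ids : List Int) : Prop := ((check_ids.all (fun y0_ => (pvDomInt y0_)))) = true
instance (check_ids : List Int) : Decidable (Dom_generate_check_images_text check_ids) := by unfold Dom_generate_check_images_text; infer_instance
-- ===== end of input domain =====

-- B replaces A's manual accumulation loop over [:-2] plus a hand-assembled two-element
-- tail with precomputed number strings, early returns and a single ", ".join over [:-1]
-- (idiomatic decomposition; same cost).


-- ===== PORT A =====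
def generate_check_images_text (check_ids : List Int) : String :=
  let text := ""
  if check_ids.length = 1 then
    "### Please carefully check image " ++ PySem.Int.toStr (PySem.List.pyGetD check_ids 0 0 + 1) ++ "."
  else if 1 ≤ check_ids.length then
    let text := "### Please carefully check images "
    let text := (PySem.List.slice check_ids none (some (-2))).foldl
      (fun acc check_id => acc ++ PySem.Int.toStr (check_id + 1) ++ ", ") text
    text ++ PySem.Int.toStr (PySem.List.pyGetD check_ids (-2) 0 + 1) ++ " and "
         ++ PySem.Int.toStr (PySem.List.pyGetD check_ids (-1) 0 + 1) ++ "."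
  else text

-- ===== PORT B =====
def generate_check_images_text_alt (check_ids : List Int) : String :=
  let nums := check_ids.map (fun c => PySem.Int.toStr (c + 1))
  if nums = [] then ""
  else if nums.length = 1 then
    "### Please carefully check image " ++ PySem.List.pyGetD nums 0 "" ++ "."
  else
    "### Please carefully check images "
      ++ PySem.Str.join ", " (PySem.List.slice nums none (some (-1)))
      ++ " and " ++ PySem.List.pyGetD nums (-1) "" ++ "."

-- ===== PRECONDITION & SPEC =====
def Spec_generate_check_images_text (check_ids : List Int) (out : String) : Prop := out = generate_check_images_text_alt check_ids
instance (check_ids : List Int) (out : String) : Decidable (Spec_generate_check_images_text check_ids out) := by unfold Spec_generate_check_images_text; infer_instance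

-- ===== CLAIM (what is proved, stated in full; the proofs are below) =====
def Claim_equal_generate_check_images_text : Prop := ∀ (check_ids : List Int), Dom_generate_check_images_text check_ids → Spec_generate_check_images_text check_ids (generate_check_images_text check_ids)

-- ===== LEMMAS AND PROOFS =====

-- A's accumulation loop, on the character-list side.
theorem pv_foldl_toList (l : List String) (acc : String) :
    (l.foldl (fun a s => a ++ s ++ ", ") acc).toList
      = acc.toList ++ (l.map (fun s => s.toList ++ [',', ' '])).flatten := by
  induction l generalizing acc with
  | nil => simp
  | cons s t ih => simp [ih, String.toList_append]

-- B's ", ".join with a final element, on the character-list side.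
theorem pv_join_toList (l : List String) (t : String) :
    (PySem.Str.join ", " (l ++ [t])).toList
      = (l.map (fun s => s.toList ++ [',', ' '])).flatten ++ t.toList := by
  induction l with
  | nil => simp [PySem.Str.join]
  | cons s r ih =>
    cases r with
    | nil => simp [PySem.Str.join, PySem.Chars.join_cons_cons]
    | cons s' r' =>
      simp only [List.cons_append] at ih ⊢
      simp [PySem.Str.join, PySem.Chars.join_cons_cons] at ih ⊢
      simp [ih]

-- the main case: a list with at least two elements, written as l ++ [x, y]
theorem pv_main (l : List Int) (x y : Int) :
    generate_check_images_text (l ++ [x, y]) = generate_check_images_text_alt (l ++ [x, y]) := by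
  have hlen : (l ++ [x, y]).length = l.length + 2 := by simp
  have hslice2 : PySem.List.slice (l ++ [x, y]) none (some (-2)) = l := by
    rw [PySem.List.slice_to_neg_ofNat _ 2 (by omega)]
    simp
  have hg2 : PySem.List.pyGetD (l ++ [x, y]) (-2) 0 = x := by
    rw [PySem.List.pyGetD_neg_ofNat _ 2 0 (by omega) (by simp)]
    simp
  have hg1 : PySem.List.pyGetD (l ++ [x, y]) (-1) 0 = y := by
    have : l ++ [x, y] = (l ++ [x]) ++ [y] := by simp
    rw [this, PySem.List.pyGetD_neg_one_append_singleton]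
  unfold generate_check_images_text generate_check_images_text_alt
  simp only [hlen, hslice2, hg2, hg1]
  have h1 : ¬ (l.length + 2 = 1) := by omega
  have hmap : (l ++ [x, y]).map (fun c => PySem.Int.toStr (c + 1))
      = (l.map (fun c => PySem.Int.toStr (c + 1)) ++ [PySem.Int.toStr (x + 1)]) ++ [PySem.Int.toStr (y + 1)] := by
    simp
  rw [hmap]
  have hne : (l.map (fun c => PySem.Int.toStr (c + 1)) ++ [PySem.Int.toStr (x + 1)]) ++ [PySem.Int.toStr (y + 1)] ≠ [] := by simp
  have hlen2 : ((l.map (fun c => PySem.Int.toStr (c + 1)) ++ [PySem.Int.toStr (x + 1)]) ++ [PySem.Int.toStr (y + 1)]).length ≠ 1 := by simp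
  simp only [if_neg h1, if_pos (by omega : 1 ≤ l.length + 2), if_neg hne, if_neg hlen2,
    PySem.List.slice_to_neg_one, List.dropLast_concat, PySem.List.pyGetD_neg_one_append_singleton]
  apply String.toList_inj.mp
  have hfold : l.foldl (fun acc c => acc ++ PySem.Int.toStr (c + 1) ++ ", ")
      ("### Please carefully check images " : String)
      = (l.map (fun c => PySem.Int.toStr (c + 1))).foldl (fun a s => a ++ s ++ ", ")
        ("### Please carefully check images " : String) := by
    rw [List.foldl_map]
  simp only [String.toList_append, hfold, pv_foldl_toList, pv_join_toList, List.append_assoc]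

-- ===== VERDICT (by name: the statement is the Claim_ definition above) =====
theorem generate_check_images_text_spec : Claim_equal_generate_check_images_text := by
  intro check_ids _
  unfold Spec_generate_check_images_text
  match h : check_ids.reverse with
  | [] =>
    have : check_ids = [] := by simpa using congrArg List.reverse h
    subst this; rfl
  | [a] =>
    have : check_ids = [a] := by simpa using congrArg List.reverse h
    subst this
    simp [generate_check_images_text, generate_check_images_text_alt,
      PySem.List.pyGetD_zero_cons]
  | y :: x :: r =>
    have : check_ids = r.reverse ++ [x, y] := by
      have := congrArg List.reverse h
      simpa using this
    rw [this, pv_main]
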